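-- pv_equiv track=rewrite | github.com/AsavariCharati/neurogrid | backend/app.py | get_empty_cells_reachable
-- ===== SOURCE A (Python) =====
-- from collections import deque
--
-- def get_empty_cells_reachable(pos, grid):
--     # BFS to count how many empty cells AI can reach from pos
--     visited = set()
--     queue = deque()
--     queue.append((pos['r'], pos['c']))
--     visited.add((pos['r'], pos['c']))
--     count = 0
--     while queue:
--         r, c = queue.popleft()
--         for dr, dc in [(-1,0),(1,0),(0,-1),(0,1)]:
--             nr, nc = r + dr, c + dc
--             if 0 <= nr < 10 and 0 <= nc < 10 and (nr, nc) not in visited: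
--                 if grid[nr][nc] == 'empty' or grid[nr][nc] == 'ai':
--                     visited.add((nr, nc))
--                     if grid[nr][nc] == 'empty':
--                         count += 1
--                     queue.append((nr, nc))
--     return count
-- ===== SOURCE B (Python) =====
-- def get_empty_cells_reachable(pos, grid):
--     # Recursive DFS flood fill (instead of a deque BFS): seed the start cell
--     # into visited without counting it, launch dfs on each traversable
--     # neighbour, count a cell on entry if it is 'empty'.
--     visited = {(pos['r'], pos['c'])}
--     count = 0
--
--     def dfs(r, c):
--         nonlocal count
--         if grid[r][c] == 'empty':
--             count += 1
--         for dr, dc in ((-1, 0), (1, 0), (0, -1), (0, 1)):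
--             nr, nc = r + dr, c + dc
--             if 0 <= nr < 10 and 0 <= nc < 10 and (nr, nc) not in visited \
--                and grid[nr][nc] in ('empty', 'ai'):
--                 visited.add((nr, nc))
--                 dfs(nr, nc)
--
--     r0, c0 = pos['r'], pos['c']
--     for dr, dc in ((-1, 0), (1, 0), (0, -1), (0, 1)):
--         nr, nc = r0 + dr, c0 + dc
--         if 0 <= nr < 10 and 0 <= nc < 10 and (nr, nc) not in visited \
--            and grid[nr][nc] in ('empty', 'ai'):
--             visited.add((nr, nc))
--             dfs(nr, nc)
--     return count
-- ===== Notes on version B (the rewrite author's own statement) =====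
-- stated objective: alternative
-- what changed: Replaces the iterative deque-BFS with a recursive DFS flood fill: an inner dfs counts a cell on entry and recurses into unvisited traversable neighbours, with the start seeded into visited but never counted.
-- outside the precondition, e.g. on get_empty_cells_reachable({'r': 0, 'c': 0}, [['x', 'empty', 'x'], ['x', 'x', 'x']]): A returns 1, B returns 1
import Mathlib
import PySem

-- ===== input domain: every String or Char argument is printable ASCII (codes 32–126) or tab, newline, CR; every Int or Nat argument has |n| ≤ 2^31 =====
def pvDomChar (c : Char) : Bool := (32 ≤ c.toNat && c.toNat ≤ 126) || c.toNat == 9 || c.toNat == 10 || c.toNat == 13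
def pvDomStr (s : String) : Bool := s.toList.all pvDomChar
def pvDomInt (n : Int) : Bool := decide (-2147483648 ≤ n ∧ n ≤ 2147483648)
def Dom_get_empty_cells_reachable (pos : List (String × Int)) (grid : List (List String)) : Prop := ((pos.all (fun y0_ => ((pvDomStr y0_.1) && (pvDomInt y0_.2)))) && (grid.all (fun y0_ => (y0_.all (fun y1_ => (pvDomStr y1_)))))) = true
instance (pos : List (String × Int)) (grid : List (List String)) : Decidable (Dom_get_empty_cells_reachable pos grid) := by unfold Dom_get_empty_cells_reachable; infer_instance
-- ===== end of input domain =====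

-- B replaces the iterative deque-BFS with a recursive DFS flood fill (alternative decomposition, same cost).

-- ===== PORT A =====
-- shared helpers: grid[r][c] as an Option, and the 4-direction list
def cellA (grid : List (List String)) (r c : Int) : Option String :=
  (PySem.List.pyGet? grid r).bind (fun row => PySem.List.pyGet? row c)

def dirsA : List (Int × Int) := [(-1,0),(1,0),(0,-1),(0,1)]

-- the body of A's inner `for dr, dc in [...]` loop; state = (queue, visited, count)
def stepA (grid : List (List String)) (r c : Int)
    (st : List (Int × Int) × List (Int × Int) × Int) (d : Int × Int) :
    List (Int × Int) × List (Int × Int) × Int :=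
  let nr := r + d.1
  let nc := c + d.2
  if (0 ≤ nr ∧ nr < 10 ∧ 0 ≤ nc ∧ nc < 10) ∧ (nr, nc) ∉ st.2.1 then
    if cellA grid nr nc = some "empty" ∨ cellA grid nr nc = some "ai" then
      (st.1 ++ [(nr, nc)], st.2.1 ++ [(nr, nc)],
        if cellA grid nr nc = some "empty" then st.2.2 + 1 else st.2.2)
    else st
  else st

-- A's `while queue:` loop; the fuel only makes it total (101 provably never runs out: see bfsA_spec)
def bfsA (grid : List (List String)) :
    Nat → List (Int × Int) → List (Int × Int) → Int → Int × List (Int × Int)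
  | 0, _, vis, cnt => (cnt, vis)
  | _ + 1, [], vis, cnt => (cnt, vis)
  | fuel + 1, (r, c) :: qs, vis, cnt =>
    let st := dirsA.foldl (stepA grid r c) (qs, vis, cnt)
    bfsA grid fuel st.1 st.2.1 st.2.2

def get_empty_cells_reachable (pos : List (String × Int)) (grid : List (List String)) : Int :=
  match PySem.Dict.get? (PySem.Dict.mk pos) "r", PySem.Dict.get? (PySem.Dict.mk pos) "c" with
  | some r, some c => (bfsA grid 101 [(r, c)] [(r, c)] 0).1
  | _, _ => 0    -- KeyError in Python; outside Pre_

-- ===== PORT B =====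
-- B-side copies of the grid accessor and direction list (B is self-contained)
def cellB (grid : List (List String)) (r c : Int) : Option String :=
  (PySem.List.pyGet? grid r).bind (fun row => PySem.List.pyGet? row c)

def dirsB : List (Int × Int) := [(-1,0),(1,0),(0,-1),(0,1)]

-- B's recursive `dfs(r, c)`; state = (visited, count); fuel only makes it total (101 suffices: see dfsB_spec)
def dfsB (grid : List (List String)) :
    Nat → Int → Int → List (Int × Int) × Int → List (Int × Int) × Int
  | 0, _, _, st => st
  | fuel + 1, r, c, st =>
    let cnt := if cellB grid r c = some "empty" then st.2 + 1 else st.2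
    dirsB.foldl (fun st' d =>
      let nr := r + d.1
      let nc := c + d.2
      if (0 ≤ nr ∧ nr < 10 ∧ 0 ≤ nc ∧ nc < 10) ∧ (nr, nc) ∉ st'.1 ∧
         (cellB grid nr nc = some "empty" ∨ cellB grid nr nc = some "ai") then
        dfsB grid fuel nr nc (st'.1 ++ [(nr, nc)], st'.2)
      else st') (st.1, cnt)

-- the body of B's top-level `for dr, dc in (...)` loop (guard + launch of dfs)
def stepB (grid : List (List String)) (fuel : Nat) (r c : Int)
    (st : List (Int × Int) × Int) (d : Int × Int) : List (Int × Int) × Int :=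
  let nr := r + d.1
  let nc := c + d.2
  if (0 ≤ nr ∧ nr < 10 ∧ 0 ≤ nc ∧ nc < 10) ∧ (nr, nc) ∉ st.1 ∧
     (cellB grid nr nc = some "empty" ∨ cellB grid nr nc = some "ai") then
    dfsB grid fuel nr nc (st.1 ++ [(nr, nc)], st.2)
  else st

def get_empty_cells_reachable_alt (pos : List (String × Int)) (grid : List (List String)) : Int :=
  match PySem.Dict.get? (PySem.Dict.mk pos) "r" with
  | none => 0    -- KeyError in Python; outside Pre_
  | some r =>
    match PySem.Dict.get? (PySem.Dict.mk pos) "c" with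
    | none => 0    -- KeyError in Python; outside Pre_
    | some c => (dirsB.foldl (stepB grid 101 r c) ([(r, c)], 0)).2

-- ===== PRECONDITION & SPEC =====
-- Pre_'s own copy of the grid accessor (Pre_ is independent of both ports)
def cellPre (grid : List (List String)) (r c : Int) : Option String :=
  (PySem.List.pyGet? grid r).bind (fun row => PySem.List.pyGet? row c)

def pvFull10 (grid : List (List String)) : Prop :=
  10 ≤ grid.length ∧ ∀ row ∈ grid.take 10, 10 ≤ row.length

def pvBlockedAt (grid : List (List String)) (p : Int × Int) : Prop :=
  ¬(0 ≤ p.1 ∧ p.1 < 10 ∧ 0 ≤ p.2 ∧ p.2 < 10) ∨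
  ((cellPre grid p.1 p.2).isSome ∧ cellPre grid p.1 p.2 ≠ some "empty" ∧ cellPre grid p.1 p.2 ≠ some "ai")

-- Pre_ excludes: missing 'r'/'c' keys (KeyError), and grids smaller than the full 10×10 board the
-- function hardcodes unless every start neighbour is immediately blocked or out of range — on
-- smaller grids the absence of an IndexError depends on the search path, which is not a
-- closed-form condition on the input.
def Pre_get_empty_cells_reachable (pos : List (String × Int)) (grid : List (List String)) : Prop :=
  (PySem.Dict.get? (PySem.Dict.mk pos) "r").isSome ∧
  (PySem.Dict.get? (PySem.Dict.mk pos) "c").isSome ∧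
  (pvFull10 grid ∨
   ∀ d ∈ [((-1:Int),(0:Int)),(1,0),(0,-1),(0,1)], pvBlockedAt grid ((PySem.Dict.get? (PySem.Dict.mk pos) "r").getD 0 + d.1,
                                   (PySem.Dict.get? (PySem.Dict.mk pos) "c").getD 0 + d.2))

instance (pos : List (String × Int)) (grid : List (List String)) : Decidable (Pre_get_empty_cells_reachable pos grid) := by
  unfold Pre_get_empty_cells_reachable pvFull10 pvBlockedAt; infer_instance

def pvWitness_get_empty_cells_reachable : (List (String × Int)) × List (List String) :=
  ([("r", 4), ("c", 4)],
   [["empty","empty","empty","empty","empty","empty","empty","empty","empty","empty"],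
    ["empty","wall","wall","wall","wall","wall","wall","wall","wall","empty"],
    ["empty","wall","empty","empty","empty","empty","empty","empty","wall","empty"],
    ["empty","wall","empty","wall","wall","wall","wall","empty","wall","empty"],
    ["empty","wall","empty","wall","empty","ai","wall","empty","wall","empty"],
    ["empty","wall","empty","wall","wall","empty","wall","empty","wall","empty"],
    ["empty","wall","empty","empty","empty","empty","wall","empty","wall","empty"],
    ["empty","wall","wall","wall","wall","wall","wall","empty","wall","empty"],
    ["empty","empty","empty","empty","empty","empty","empty","empty","wall","empty"],
    ["empty","empty","empty","empty","empty","empty","empty","empty","empty","empty"]])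

def Spec_get_empty_cells_reachable (pos : List (String × Int)) (grid : List (List String)) (out : Int) : Prop := out = get_empty_cells_reachable_alt pos grid
instance (pos : List (String × Int)) (grid : List (List String)) (out : Int) : Decidable (Spec_get_empty_cells_reachable pos grid out) := by unfold Spec_get_empty_cells_reachable; infer_instance

-- ===== CLAIM (what is proved, stated in full; the proofs are below) =====
def Claim_equal_get_empty_cells_reachable : Prop := ∀ (pos : List (String × Int)) (grid : List (List String)), Dom_get_empty_cells_reachable pos grid → Pre_get_empty_cells_reachable pos grid → Spec_get_empty_cells_reachable pos grid (get_empty_cells_reachable pos grid)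

-- ===== LEMMAS AND PROOFS =====

lemma cellBA : cellB = cellA := rfl
lemma dirsBA : dirsB = dirsA := rfl

def nbh (p d : Int × Int) : Int × Int := (p.1 + d.1, p.2 + d.2)

def TravP (grid : List (List String)) (p : Int × Int) : Prop :=
  (0 ≤ p.1 ∧ p.1 < 10 ∧ 0 ≤ p.2 ∧ p.2 < 10) ∧
  (cellA grid p.1 p.2 = some "empty" ∨ cellA grid p.1 p.2 = some "ai")

inductive ReachP (grid : List (List String)) (s : Int × Int) : (Int × Int) → Prop
  | base (d : Int × Int) (hd : d ∈ dirsA) (ht : TravP grid (nbh s d)) : ReachP grid s (nbh s d)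
  | step (p d : Int × Int) (hp : ReachP grid s p) (hd : d ∈ dirsA) (ht : TravP grid (nbh p d)) :
      ReachP grid s (nbh p d)

def ClosedAt (grid : List (List String)) (v : List (Int × Int)) (p : Int × Int) : Prop :=
  ∀ d ∈ dirsA, TravP grid (nbh p d) → nbh p d ∈ v

def predC (grid : List (List String)) (s : Int × Int) : (Int × Int) → Bool :=
  fun p => decide (p ≠ s ∧ cellA grid p.1 p.2 = some "empty")

def GoodV (grid : List (List String)) (s : Int × Int) (v : List (Int × Int)) : Prop :=
  v.Nodup ∧ s ∈ v ∧ (∀ p ∈ v, p = s ∨ (TravP grid p ∧ ReachP grid s p)) ∧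
  (∀ p ∈ v, ClosedAt grid v p)

lemma closedAt_mono {grid : List (List String)} {v v' : List (Int × Int)} {p : Int × Int}
    (hsub : ∀ x ∈ v, x ∈ v') (h : ClosedAt grid v p) : ClosedAt grid v' p :=
  fun d hd ht => hsub _ (h d hd ht)

lemma good_mem {grid : List (List String)} {s : Int × Int} {v : List (Int × Int)}
    (h : GoodV grid s v) : ∀ p, p ∈ v ↔ (p = s ∨ ReachP grid s p) := by
  obtain ⟨hn, hs, hr, hc⟩ := h
  intro p
  constructor
  · intro hp; rcases hr p hp with h1 | h2
    · exact Or.inl h1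
    · exact Or.inr h2.2
  · rintro (rfl | hre)
    · exact hs
    · induction hre with
      | base d hd ht => exact hc s hs d hd ht
      | step p d hp hd ht ih => exact hc p ih d hd ht

lemma nodup_subset_length {v v' : List (Int × Int)} (hn : v.Nodup) (hsub : ∀ x ∈ v, x ∈ v') :
    v.length ≤ v'.length := by
  calc v.length = v.toFinset.card := (List.toFinset_card_of_nodup hn).symm
    _ ≤ v'.toFinset.card := Finset.card_le_card (by intro x hx; simp only [List.mem_toFinset] at *; exact hsub x hx)
    _ ≤ v'.length := List.toFinset_card_le v'

lemma length_le_101 {grid : List (List String)} {s : Int × Int} {v : List (Int × Int)}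
    (hn : v.Nodup) (hr : ∀ p ∈ v, p = s ∨ (TravP grid p ∧ ReachP grid s p)) :
    v.length ≤ 101 := by
  have hsub : v.toFinset ⊆ insert s ((Finset.Icc (0:Int) 9) ×ˢ (Finset.Icc (0:Int) 9)) := by
    intro p hp
    simp only [List.mem_toFinset] at hp
    rcases hr p hp with rfl | ⟨ht, _⟩
    · exact Finset.mem_insert_self _ _
    · obtain ⟨h1, h2, h3, h4⟩ := ht.1
      refine Finset.mem_insert_of_mem ?_
      simp only [Finset.mem_product, Finset.mem_Icc]
      omega
  have hcard : v.toFinset.card ≤ 101 := by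
    refine le_trans (Finset.card_le_card hsub) ?_
    refine le_trans (Finset.card_insert_le _ _) ?_
    rw [Finset.card_product, Int.card_Icc]
    decide
  rw [← List.toFinset_card_of_nodup hn]; exact hcard

lemma count_good_eq {grid : List (List String)} {s : Int × Int} {va vb : List (Int × Int)}
    (hA : GoodV grid s va) (hB : GoodV grid s vb) (f : (Int × Int) → Bool) :
    va.countP f = vb.countP f := by
  have hperm : va.Perm vb := by
    rw [List.perm_ext_iff_of_nodup hA.1 hB.1]
    intro a; rw [good_mem hA, good_mem hB]
  exact hperm.countP_eq f

-- appending one fresh non-start cell to the visited list adds (1 if empty) to the count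
lemma countP_append_one {grid : List (List String)} {s p : Int × Int} {v : List (Int × Int)}
    (hne : p ≠ s) :
    ((v ++ [p]).countP (predC grid s) : Int) =
      if cellA grid p.1 p.2 = some "empty" then (v.countP (predC grid s) : Int) + 1
      else (v.countP (predC grid s) : Int) := by
  rw [List.countP_append]
  by_cases h : cellA grid p.1 p.2 = some "empty"
  · simp [predC, hne, h]
  · simp [predC, hne, h]

-- ===== A side =====

def AInvP (grid : List (List String)) (s : Int × Int)
    (q v : List (Int × Int)) (cnt : Int) : Prop :=
  v.Nodup ∧ s ∈ v ∧ (∀ p ∈ q, p ∈ v) ∧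
  (∀ p ∈ v, p = s ∨ (TravP grid p ∧ ReachP grid s p)) ∧
  (∀ p ∈ v, ClosedAt grid v p ∨ p ∈ q) ∧
  cnt = (v.countP (predC grid s) : Int)

lemma stepA_spec (grid : List (List String)) (s : Int × Int) (r c : Int)
    (hcr : (r, c) = s ∨ ReachP grid s (r, c))
    (d : Int × Int) (hd : d ∈ dirsA)
    (st : List (Int × Int) × List (Int × Int) × Int)
    (h1 : st.2.1.Nodup) (h2 : s ∈ st.2.1) (h3 : ∀ p ∈ st.1, p ∈ st.2.1)
    (h4 : ∀ p ∈ st.2.1, p = s ∨ (TravP grid p ∧ ReachP grid s p))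
    (h5 : st.2.2 = (st.2.1.countP (predC grid s) : Int)) :
    (stepA grid r c st d).2.1.Nodup ∧ s ∈ (stepA grid r c st d).2.1 ∧
    (∀ p ∈ (stepA grid r c st d).1, p ∈ (stepA grid r c st d).2.1) ∧
    (∀ p ∈ (stepA grid r c st d).2.1, p = s ∨ (TravP grid p ∧ ReachP grid s p)) ∧
    (stepA grid r c st d).2.2 = ((stepA grid r c st d).2.1.countP (predC grid s) : Int) ∧
    (∀ p ∈ st.2.1, p ∈ (stepA grid r c st d).2.1) ∧
    (∀ p ∈ st.1, p ∈ (stepA grid r c st d).1) ∧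
    (TravP grid (nbh (r, c) d) → nbh (r, c) d ∈ (stepA grid r c st d).2.1) ∧
    (∀ p ∈ (stepA grid r c st d).2.1, p ∈ st.2.1 ∨ p ∈ (stepA grid r c st d).1) ∧
    (stepA grid r c st d).1.length + st.2.1.length = st.1.length + (stepA grid r c st d).2.1.length := by
  unfold stepA
  by_cases hg : (0 ≤ r + d.1 ∧ r + d.1 < 10 ∧ 0 ≤ c + d.2 ∧ c + d.2 < 10) ∧ (r + d.1, c + d.2) ∉ st.2.1
  · by_cases hcell : cellA grid (r + d.1) (c + d.2) = some "empty" ∨ cellA grid (r + d.1) (c + d.2) = some "ai"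
    · rw [if_pos hg, if_pos hcell]
      have hxs : (r + d.1, c + d.2) ≠ s := by
        intro h; exact hg.2 (h ▸ h2)
      have htrav : TravP grid (r + d.1, c + d.2) := ⟨hg.1, hcell⟩
      have hreach : ReachP grid s (r + d.1, c + d.2) := by
        have hx : (r + d.1, c + d.2) = nbh (r, c) d := rfl
        rw [hx]
        rcases hcr with h | h
        · subst h; exact ReachP.base d hd htrav
        · exact ReachP.step (r, c) d h hd htrav
      refine ⟨?_, ?_, ?_, ?_, ?_, ?_, ?_, ?_, ?_, ?_⟩
      · refine h1.append (List.nodup_singleton _) ?_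
        intro x hx hx'
        simp only [List.mem_singleton] at hx'
        exact hg.2 (hx' ▸ hx)
      · exact List.mem_append_left _ h2
      · intro p hp
        rcases List.mem_append.mp hp with hp | hp
        · exact List.mem_append_left _ (h3 p hp)
        · exact List.mem_append_right _ hp
      · intro p hp
        rcases List.mem_append.mp hp with hp | hp
        · exact h4 p hp
        · simp only [List.mem_singleton] at hp
          subst hp
          exact Or.inr ⟨htrav, hreach⟩
      · show (if cellA grid (r + d.1) (c + d.2) = some "empty" then st.2.2 + 1 else st.2.2)
          = ((st.2.1 ++ [(r + d.1, c + d.2)]).countP (predC grid s) : Int)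
        rw [countP_append_one hxs, h5]
      · intro p hp; exact List.mem_append_left _ hp
      · intro p hp; exact List.mem_append_left _ hp
      · intro _; exact List.mem_append_right _ (by simp [nbh])
      · intro p hp
        rcases List.mem_append.mp hp with hp | hp
        · exact Or.inl hp
        · exact Or.inr (List.mem_append_right _ hp)
      · show (st.1 ++ [(r + d.1, c + d.2)]).length + st.2.1.length
          = st.1.length + (st.2.1 ++ [(r + d.1, c + d.2)]).length
        simp only [List.length_append, List.length_singleton]
        omega
    · rw [if_pos hg, if_neg hcell]
      refine ⟨h1, h2, h3, h4, h5, fun p hp => hp, fun p hp => hp, ?_, fun p hp => Or.inl hp, by omega⟩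
      intro ht; exact absurd ht.2 (by simpa [nbh] using hcell)
  · rw [if_neg hg]
    refine ⟨h1, h2, h3, h4, h5, fun p hp => hp, fun p hp => hp, ?_, fun p hp => Or.inl hp, by omega⟩
    intro ht
    have hrange : 0 ≤ r + d.1 ∧ r + d.1 < 10 ∧ 0 ≤ c + d.2 ∧ c + d.2 < 10 := by
      simpa [nbh] using ht.1
    by_contra hmem
    exact hg ⟨hrange, by simpa [nbh] using hmem⟩

lemma foldA_spec (grid : List (List String)) (s : Int × Int) (r c : Int)
    (hcr : (r, c) = s ∨ ReachP grid s (r, c)) :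
    ∀ (ds : List (Int × Int)), (∀ d ∈ ds, d ∈ dirsA) →
    ∀ (st : List (Int × Int) × List (Int × Int) × Int),
    st.2.1.Nodup → s ∈ st.2.1 → (∀ p ∈ st.1, p ∈ st.2.1) →
    (∀ p ∈ st.2.1, p = s ∨ (TravP grid p ∧ ReachP grid s p)) →
    st.2.2 = (st.2.1.countP (predC grid s) : Int) →
    (ds.foldl (stepA grid r c) st).2.1.Nodup ∧ s ∈ (ds.foldl (stepA grid r c) st).2.1 ∧
    (∀ p ∈ (ds.foldl (stepA grid r c) st).1, p ∈ (ds.foldl (stepA grid r c) st).2.1) ∧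
    (∀ p ∈ (ds.foldl (stepA grid r c) st).2.1, p = s ∨ (TravP grid p ∧ ReachP grid s p)) ∧
    (ds.foldl (stepA grid r c) st).2.2 = ((ds.foldl (stepA grid r c) st).2.1.countP (predC grid s) : Int) ∧
    (∀ p ∈ st.2.1, p ∈ (ds.foldl (stepA grid r c) st).2.1) ∧
    (∀ p ∈ st.1, p ∈ (ds.foldl (stepA grid r c) st).1) ∧
    (∀ d ∈ ds, TravP grid (nbh (r, c) d) → nbh (r, c) d ∈ (ds.foldl (stepA grid r c) st).2.1) ∧
    (∀ p ∈ (ds.foldl (stepA grid r c) st).2.1, p ∈ st.2.1 ∨ p ∈ (ds.foldl (stepA grid r c) st).1) ∧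
    (ds.foldl (stepA grid r c) st).1.length + st.2.1.length = st.1.length + (ds.foldl (stepA grid r c) st).2.1.length := by
  intro ds
  induction ds with
  | nil =>
    intro _ st h1 h2 h3 h4 h5
    simp only [List.foldl_nil]
    refine ⟨h1, h2, h3, h4, h5, fun p hp => hp, fun p hp => hp, ?_, fun p hp => Or.inl hp, ?_⟩
    · intro d hd; simp at hd
    · trivial
  | cons d ds ihds =>
    intro hds st h1 h2 h3 h4 h5
    have hd : d ∈ dirsA := hds d (by simp)
    obtain ⟨a1, a2, a3, a4, a5, a6, a7, a8, a9, a10⟩ := stepA_spec grid s r c hcr d hd st h1 h2 h3 h4 h5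
    obtain ⟨b1, b2, b3, b4, b5, b6, b7, b8, b9, b10⟩ :=
      ihds (fun d' hd' => hds d' (by simp [hd'])) (stepA grid r c st d) a1 a2 a3 a4 a5
    rw [List.foldl_cons]
    refine ⟨b1, b2, b3, b4, b5, fun p hp => b6 p (a6 p hp), fun p hp => b7 p (a7 p hp), ?_, ?_, by omega⟩
    · intro d' hd' ht
      rcases List.mem_cons.mp hd' with rfl | hmem
      · exact b6 _ (a8 ht)
      · exact b8 d' hmem ht
    · intro p hp
      rcases b9 p hp with hmem | hq
      · rcases a9 p hmem with h | h
        · exact Or.inl h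
        · exact Or.inr (b7 p h)
      · exact Or.inr hq

lemma bfsA_spec (grid : List (List String)) (s : Int × Int) :
    ∀ (fuel : Nat) (q v : List (Int × Int)) (cnt : Int),
    AInvP grid s q v cnt → q.length + 101 ≤ fuel + v.length →
    ∃ vf, bfsA grid fuel q v cnt = ((vf.countP (predC grid s) : Int), vf) ∧ GoodV grid s vf := by
  intro fuel
  induction fuel with
  | zero =>
    intro q v cnt hinv hm
    obtain ⟨h1, h2, h3, h4, h5, h6⟩ := hinv
    have hlen := length_le_101 h1 h4
    have hq : q = [] := by
      cases q with
      | nil => rfl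
      | cons a as => exfalso; simp only [List.length_cons] at hm; omega
    subst hq
    exact ⟨v, by rw [h6] at *; rfl,
      h1, h2, h4, fun p hp => (h5 p hp).resolve_right (by simp)⟩
  | succ fuel ih =>
    intro q v cnt hinv hm
    obtain ⟨h1, h2, h3, h4, h5, h6⟩ := hinv
    cases q with
    | nil =>
      exact ⟨v, by rw [h6] at *; rfl,
        h1, h2, h4, fun p hp => (h5 p hp).resolve_right (by simp)⟩
    | cons rc qs =>
      obtain ⟨r, c⟩ := rc
      have hcr : (r, c) = s ∨ ReachP grid s (r, c) := by
        rcases h4 (r, c) (h3 _ (by simp)) with h | h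
        · exact Or.inl h
        · exact Or.inr h.2
      obtain ⟨b1, b2, b3, b4, b5, b6, b7, b8, b9, b10⟩ :=
        foldA_spec grid s r c hcr dirsA (fun d hd => hd) (qs, v, cnt)
          h1 h2 (fun p hp => h3 p (by simp [hp])) h4 h6
      set st := dirsA.foldl (stepA grid r c) (qs, v, cnt) with hst
      have hclosed : ∀ p ∈ st.2.1, ClosedAt grid st.2.1 p ∨ p ∈ st.1 := by
        intro p hp
        rcases b9 p hp with hold | hq
        · rcases h5 p hold with hc | hq
          · exact Or.inl (closedAt_mono b6 hc)
          · rcases List.mem_cons.mp hq with rfl | hqs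
            · exact Or.inl (fun d hd ht => b8 d hd ht)
            · exact Or.inr (b7 _ hqs)
        · exact Or.inr hq
      have hinv' : AInvP grid s st.1 st.2.1 st.2.2 := ⟨b1, b2, b3, b4, hclosed, b5⟩
      have hm' : st.1.length + 101 ≤ fuel + st.2.1.length := by
        have b10' : st.1.length + v.length = qs.length + st.2.1.length := by simpa using b10
        simp only [List.length_cons] at hm
        omega
      obtain ⟨vf, heq, hgood⟩ := ih st.1 st.2.1 st.2.2 hinv' hm'
      refine ⟨vf, ?_, hgood⟩
      rw [show bfsA grid (fuel + 1) ((r, c) :: qs) v cnt = bfsA grid fuel st.1 st.2.1 st.2.2 from rfl]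
      exact heq

-- ===== B side =====

def BMid (grid : List (List String)) (s : Int × Int) (v : List (Int × Int))
    (st : List (Int × Int) × Int) : Prop :=
  (∀ p ∈ v, p ∈ st.1) ∧ (∀ p ∈ st.1, p ∈ v ∨ ClosedAt grid st.1 p) ∧
  st.1.Nodup ∧ s ∈ st.1 ∧ (∀ p ∈ st.1, p = s ∨ (TravP grid p ∧ ReachP grid s p)) ∧
  st.2 = (st.1.countP (predC grid s) : Int)

def DfsStmt (grid : List (List String)) (s : Int × Int) (fuel : Nat) : Prop :=
  ∀ (r c : Int) (v : List (Int × Int)) (cnt : Int),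
    v.Nodup → s ∈ v → (∀ p ∈ v, p = s ∨ (TravP grid p ∧ ReachP grid s p)) →
    (r, c) ∉ v → TravP grid (r, c) → ReachP grid s (r, c) →
    cnt = (v.countP (predC grid s) : Int) →
    102 ≤ fuel + (v.length + 1) →
    BMid grid s v (dfsB grid fuel r c (v ++ [(r, c)], cnt)) ∧
    (∀ p ∈ v ++ [(r, c)], p ∈ (dfsB grid fuel r c (v ++ [(r, c)], cnt)).1)

lemma dfsB_succ (grid : List (List String)) (fuel : Nat) (r c : Int)
    (st : List (Int × Int) × Int) :
    dfsB grid (fuel + 1) r c st =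
      dirsB.foldl (stepB grid fuel r c)
        (st.1, if cellB grid r c = some "empty" then st.2 + 1 else st.2) := rfl

lemma stepB_spec (grid : List (List String)) (s : Int × Int) (fuel : Nat)
    (ih : DfsStmt grid s fuel) (rc : Int × Int)
    (hcr : rc = s ∨ ReachP grid s rc)
    (vb : List (Int × Int)) (hvb : vb.Nodup) (hbound : 101 ≤ fuel + vb.length)
    (d : Int × Int) (hd : d ∈ dirsA)
    (st : List (Int × Int) × Int) (hmid : BMid grid s vb st) :
    BMid grid s vb (stepB grid fuel rc.1 rc.2 st d) ∧
    (∀ p ∈ st.1, p ∈ (stepB grid fuel rc.1 rc.2 st d).1) ∧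
    (TravP grid (nbh rc d) → nbh rc d ∈ (stepB grid fuel rc.1 rc.2 st d).1) := by
  obtain ⟨m1, m2, m3, m4, m5, m6⟩ := hmid
  unfold stepB
  by_cases hg : (0 ≤ rc.1 + d.1 ∧ rc.1 + d.1 < 10 ∧ 0 ≤ rc.2 + d.2 ∧ rc.2 + d.2 < 10) ∧
      (rc.1 + d.1, rc.2 + d.2) ∉ st.1 ∧
      (cellB grid (rc.1 + d.1) (rc.2 + d.2) = some "empty" ∨
       cellB grid (rc.1 + d.1) (rc.2 + d.2) = some "ai")
  · rw [if_pos hg]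
    have htrav : TravP grid (rc.1 + d.1, rc.2 + d.2) := ⟨hg.1, hg.2.2⟩
    have hreach : ReachP grid s (rc.1 + d.1, rc.2 + d.2) := by
      have hx : (rc.1 + d.1, rc.2 + d.2) = nbh rc d := rfl
      rw [hx]
      rcases hcr with h | h
      · subst h; exact ReachP.base d hd htrav
      · exact ReachP.step rc d h hd htrav
    have hbound' : 102 ≤ fuel + (st.1.length + 1) := by
      have := nodup_subset_length hvb m1
      omega
    obtain ⟨⟨c1, c2, c3, c4, c5, c6⟩, csub⟩ :=
      ih (rc.1 + d.1) (rc.2 + d.2) st.1 st.2 m3 m4 m5 hg.2.1 htrav hreach m6 hbound'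
    set res := dfsB grid fuel (rc.1 + d.1) (rc.2 + d.2) (st.1 ++ [(rc.1 + d.1, rc.2 + d.2)], st.2) with hres
    have hmono : ∀ p ∈ st.1, p ∈ res.1 := c1
    refine ⟨⟨fun p hp => hmono p (m1 p hp), ?_, c3, c4, c5, c6⟩, hmono, ?_⟩
    · intro p hp
      rcases c2 p hp with hmem | hc
      · rcases m2 p hmem with hv | hcl
        · exact Or.inl hv
        · exact Or.inr (closedAt_mono hmono hcl)
      · exact Or.inr hc
    · intro _
      exact csub _ (List.mem_append_right _ (by simp [nbh]))
  · rw [if_neg hg]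
    refine ⟨⟨m1, m2, m3, m4, m5, m6⟩, fun p hp => hp, ?_⟩
    intro ht
    have hrange : 0 ≤ rc.1 + d.1 ∧ rc.1 + d.1 < 10 ∧ 0 ≤ rc.2 + d.2 ∧ rc.2 + d.2 < 10 := by
      simpa [nbh] using ht.1
    have hcell : cellA grid (rc.1 + d.1) (rc.2 + d.2) = some "empty" ∨
        cellA grid (rc.1 + d.1) (rc.2 + d.2) = some "ai" := by
      simpa [nbh] using ht.2
    by_contra hmem
    exact hg ⟨hrange, by simpa [nbh] using hmem, hcell⟩

lemma foldB_spec (grid : List (List String)) (s : Int × Int) (fuel : Nat)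
    (ih : DfsStmt grid s fuel) (rc : Int × Int)
    (hcr : rc = s ∨ ReachP grid s rc)
    (vb : List (Int × Int)) (hvb : vb.Nodup) (hbound : 101 ≤ fuel + vb.length) :
    ∀ (ds : List (Int × Int)), (∀ d ∈ ds, d ∈ dirsA) →
    ∀ (st : List (Int × Int) × Int), BMid grid s vb st →
    BMid grid s vb (ds.foldl (stepB grid fuel rc.1 rc.2) st) ∧
    (∀ p ∈ st.1, p ∈ (ds.foldl (stepB grid fuel rc.1 rc.2) st).1) ∧
    (∀ d ∈ ds, TravP grid (nbh rc d) → nbh rc d ∈ (ds.foldl (stepB grid fuel rc.1 rc.2) st).1) := by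
  intro ds
  induction ds with
  | nil =>
    intro _ st hmid
    exact ⟨hmid, fun p hp => hp, fun d hd => absurd hd (by simp)⟩
  | cons d ds ihds =>
    intro hds st hmid
    have hd := hds d (by simp)
    obtain ⟨a1, a2, a3⟩ := stepB_spec grid s fuel ih rc hcr vb hvb hbound d hd st hmid
    obtain ⟨b1, b2, b3⟩ := ihds (fun d' h => hds d' (by simp [h])) _ a1
    rw [List.foldl_cons]
    refine ⟨b1, fun p hp => b2 p (a2 p hp), ?_⟩
    intro d' hd' ht
    rcases List.mem_cons.mp hd' with rfl | hmem
    · exact b2 _ (a3 ht)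
    · exact b3 d' hmem ht

lemma dfsB_spec (grid : List (List String)) (s : Int × Int) :
    ∀ (fuel : Nat), DfsStmt grid s fuel := by
  intro fuel
  induction fuel with
  | zero =>
    intro r c v cnt h1 h2 h3 h4 h5 h6 h7 h8
    exfalso
    have hn1 : (v ++ [(r, c)]).Nodup := by
      refine h1.append (List.nodup_singleton _) ?_
      intro x hx hx'
      simp only [List.mem_singleton] at hx'
      exact h4 (hx' ▸ hx)
    have hr1 : ∀ p ∈ v ++ [(r, c)], p = s ∨ (TravP grid p ∧ ReachP grid s p) := by
      intro p hp
      rcases List.mem_append.mp hp with hp | hp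
      · exact h3 p hp
      · simp only [List.mem_singleton] at hp
        exact Or.inr ⟨hp ▸ h5, hp ▸ h6⟩
    have hlen := length_le_101 hn1 hr1
    simp only [List.length_append, List.length_singleton] at hlen
    omega
  | succ fuel ih =>
    intro r c v cnt h1 h2 h3 h4 h5 h6 h7 h8
    rw [dfsB_succ, cellBA, dirsBA]
    have hxs : (r, c) ≠ s := fun h => h4 (h ▸ h2)
    have hn1 : (v ++ [(r, c)]).Nodup := by
      refine h1.append (List.nodup_singleton _) ?_
      intro x hx hx'
      simp only [List.mem_singleton] at hx'
      exact h4 (hx' ▸ hx)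
    have hr1 : ∀ p ∈ v ++ [(r, c)], p = s ∨ (TravP grid p ∧ ReachP grid s p) := by
      intro p hp
      rcases List.mem_append.mp hp with hp | hp
      · exact h3 p hp
      · simp only [List.mem_singleton] at hp
        exact Or.inr ⟨hp ▸ h5, hp ▸ h6⟩
    have hcnt1 : (if cellA grid r c = some "empty" then cnt + 1 else cnt)
        = (((v ++ [(r, c)]).countP (predC grid s)) : Int) := by
      rw [countP_append_one hxs, h7]
    have hmid : BMid grid s (v ++ [(r, c)])
        ((v ++ [(r, c)], if cellA grid r c = some "empty" then cnt + 1 else cnt)) :=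
      ⟨fun p hp => hp, fun p hp => Or.inl hp, hn1, List.mem_append_left _ h2, hr1, hcnt1⟩
    have hbound : 101 ≤ fuel + (v ++ [(r, c)]).length := by
      simp only [List.length_append, List.length_singleton]
      omega
    obtain ⟨b1, b2, b3⟩ := foldB_spec grid s fuel ih (r, c) (Or.inr h6) (v ++ [(r, c)]) hn1 hbound
      dirsA (fun d hd => hd) _ hmid
    obtain ⟨c1, c2, c3, c4, c5, c6⟩ := b1
    refine ⟨⟨fun p hp => c1 p (List.mem_append_left _ hp), ?_, c3, c4, c5, c6⟩, c1⟩
    intro p hp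
    rcases c2 p hp with hv1 | hc
    · rcases List.mem_append.mp hv1 with hv | hrc
      · exact Or.inl hv
      · simp only [List.mem_singleton] at hrc
        subst hrc
        exact Or.inr (fun d hd ht => b3 d hd ht)
    · exact Or.inr hc

lemma alt_good (grid : List (List String)) (r c : Int) :
    ∃ vf, (dirsB.foldl (stepB grid 101 r c) ([(r, c)], 0)).2 = ((vf.countP (predC grid (r, c)) : Int))
      ∧ GoodV grid (r, c) vf := by
  rw [dirsBA]
  have hmid : BMid grid (r, c) [(r, c)] ([(r, c)], 0) := by
    refine ⟨fun p hp => hp, fun p hp => Or.inl hp, List.nodup_singleton _, by simp, ?_, ?_⟩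
    · intro p hp
      simp only [List.mem_singleton] at hp
      exact Or.inl hp
    · simp [predC]
  obtain ⟨b1, b2, b3⟩ := foldB_spec grid (r, c) 101 (dfsB_spec grid (r, c) 101) (r, c)
    (Or.inl rfl) [(r, c)] (List.nodup_singleton _) (by simp) dirsA (fun d hd => hd)
    ([(r, c)], 0) hmid
  obtain ⟨c1, c2, c3, c4, c5, c6⟩ := b1
  refine ⟨(dirsA.foldl (stepB grid 101 r c) ([(r, c)], 0)).1, c6, c3, c4, c5, ?_⟩
  intro p hp
  rcases c2 p hp with hv | hc
  · simp only [List.mem_singleton] at hv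
    subst hv
    exact fun d hd ht => b3 d hd ht
  · exact hc

-- ===== VERDICT (by name: the statement is the Claim_ definition above) =====
theorem get_empty_cells_reachable_spec : Claim_equal_get_empty_cells_reachable := by
  intro pos grid _ hpre
  obtain ⟨hr, hc, -⟩ := hpre
  rw [Option.isSome_iff_exists] at hr hc
  obtain ⟨r, hr⟩ := hr
  obtain ⟨c, hc⟩ := hc
  unfold Spec_get_empty_cells_reachable get_empty_cells_reachable get_empty_cells_reachable_alt
  rw [hr, hc]
  have hinv : AInvP grid (r, c) [(r, c)] [(r, c)] 0 := by
    refine ⟨List.nodup_singleton _, by simp, fun p hp => hp, ?_, fun p hp => Or.inr hp, ?_⟩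
    · intro p hp
      simp only [List.mem_singleton] at hp
      exact Or.inl hp
    · simp [predC]
  obtain ⟨vfA, heqA, hgoodA⟩ := bfsA_spec grid (r, c) 101 [(r, c)] [(r, c)] 0 hinv (by simp)
  obtain ⟨vfB, heqB, hgoodB⟩ := alt_good grid r c
  show (bfsA grid 101 [(r, c)] [(r, c)] 0).1 = (List.foldl (stepB grid 101 r c) ([(r, c)], 0) dirsB).2
  rw [heqA, heqB]
  show ((List.countP (predC grid (r, c)) vfA : Nat) : Int) = ((List.countP (predC grid (r, c)) vfB : Nat) : Int)
  exact_mod_cast count_good_eq hgoodA hgoodB (predC grid (r, c))
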